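-- pv_equiv track=rewrite | github.com/jKyounju/backjoon_8 | python/backjoon_8/카잉달력.py | kaingCalendar
-- ===== SOURCE A (Python) =====
-- def kaingCalendar(im) :
--     count = 0
--     c_x = 0
--     c_y = 0
--     for i in range(im[0]*im[1]) :
--         count += 1
--         if c_x < im[0] :
--             c_x += 1
--         else :
--             c_x = 1
--         if c_y < im[1] :
--             c_y += 1
--         else :
--             c_y = 1
--         if c_x == im[2] and c_y == im[3] :
--             return count
--     return -1
-- ===== SOURCE B (Python) =====
-- def kaingCalendar(im):
--     # Step through the years whose first coordinate is already x (x, x+M, x+2M, ...)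
--     # and check only the second coordinate: O(N) instead of A's O(M*N) full scan.
--     m, n = im[0], im[1]
--     if m * n <= 0:
--         return -1
--     x, y = im[2], im[3]
--     if not (1 <= x <= m and 1 <= y <= n):
--         return -1
--     k = x
--     while k <= m * n:
--         if (k - 1) % n + 1 == y:
--             return k
--         k += m
--     return -1
-- ===== Notes on version B (the rewrite author's own statement) =====
-- stated objective: faster
-- what changed: A simulates every year 1..M*N with two cycling counters; B jumps directly through the arithmetic progression x, x+M, x+2M, ... (the only years whose first coordinate is x) and checks the second coordinate with a modulus, after a direct range test on x and y.
-- intended difference: On 4-element inputs with both M<0 and N<0 and target coordinates x = 1, y = 1, A's counters degenerate to the constant 1 and it returns 1; B returns -1, the intended value since a calendar with non-positive cycle lengths has no valid year. — e.g. on kaingCalendar([-1, -1, 1, 1]): A returns 1, B returns -1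
-- outside the precondition, e.g. on kaingCalendar([2, 2, 9]): A returns -1, B raises IndexError
import Mathlib
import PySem

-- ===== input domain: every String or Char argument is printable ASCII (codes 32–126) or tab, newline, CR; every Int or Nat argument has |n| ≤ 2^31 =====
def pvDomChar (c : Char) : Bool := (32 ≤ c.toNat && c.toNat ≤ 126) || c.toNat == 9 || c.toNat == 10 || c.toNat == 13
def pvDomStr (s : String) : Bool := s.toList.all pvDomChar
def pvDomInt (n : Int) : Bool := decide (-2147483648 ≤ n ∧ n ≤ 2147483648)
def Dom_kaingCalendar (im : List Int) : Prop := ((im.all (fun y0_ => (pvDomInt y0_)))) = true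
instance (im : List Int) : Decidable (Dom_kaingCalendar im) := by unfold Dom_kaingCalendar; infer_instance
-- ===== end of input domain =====

-- B replaces A's year-by-year simulation with a direct jump through the arithmetic
-- progression x, x+M, x+2M, … checking only the second coordinate (objective: faster).

-- ===== PORT A =====
-- A's for-loop over range(im[0]*im[1]) with state (count, c_x, c_y); fuel = number of
-- remaining iterations, early return on the match.
def kaingALoop (m n x y : Int) : Nat → Int → Int → Int → Int
  | 0, _, _, _ => -1
  | fuel + 1, count, cx, cy =>
    let count' := count + 1
    let cx' := if cx < m then cx + 1 else 1
    let cy' := if cy < n then cy + 1 else 1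
    if cx' = x ∧ cy' = y then count'
    else kaingALoop m n x y fuel count' cx' cy'

def kaingCalendar (im : List Int) : Int :=
  -- the four list reads; the .getD 0 defaults are never relevant inside Pre_ (Python raises there)
  let m := (PySem.List.pyGet? im 0).getD 0
  let n := (PySem.List.pyGet? im 1).getD 0
  let x := (PySem.List.pyGet? im 2).getD 0
  let y := (PySem.List.pyGet? im 3).getD 0
  kaingALoop m n x y (m * n).toNat 0 0 0

-- ===== PORT B =====
-- B's while-loop: k runs x, x+m, x+2m, … while k ≤ m*n; fuel n.toNat+1 covers all its
-- iterations (the branch guarantees 1 ≤ x and 1 ≤ m, so at most n checks plus the exit test).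
def kaingBLoop (m n y : Int) : Nat → Int → Int
  | 0, _ => -1
  | fuel + 1, k =>
    if k ≤ m * n then
      if PySem.Int.mod (k - 1) n + 1 = y then k else kaingBLoop m n y fuel (k + m)
    else -1

def kaingCalendar_alt (im : List Int) : Int :=
  let m := (PySem.List.pyGet? im 0).getD 0
  let n := (PySem.List.pyGet? im 1).getD 0
  if m * n ≤ 0 then -1
  else
    let x := (PySem.List.pyGet? im 2).getD 0
    let y := (PySem.List.pyGet? im 3).getD 0
    if 1 ≤ x ∧ x ≤ m ∧ 1 ≤ y ∧ y ≤ n then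
      kaingBLoop m n y (n.toNat + 1) x
    else -1

-- ===== PRECONDITION & SPEC =====
-- Pre_ excludes lists on which Python A raises IndexError (fewer than 2 elements, or fewer
-- than 4 with M*N > 0 once the lazily-read third/fourth coordinate is reached); on 3-element
-- lists with M*N > 0 where A's short-circuited 'and' never reads the fourth element and A
-- returns -1, the natural B itself raises IndexError, so those stay outside Pre_ as well.
def Pre_kaingCalendar (im : List Int) : Prop :=
  2 ≤ im.length ∧ (0 < im.getD 0 0 * im.getD 1 0 → 4 ≤ im.length)
instance (im : List Int) : Decidable (Pre_kaingCalendar im) := by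
  unfold Pre_kaingCalendar; infer_instance

def pvWitness_kaingCalendar : List Int := [3, 4, 2, 3]

-- On 4-element inputs with both M<0 and N<0 and target coordinates x = 1, y = 1, A's counters degenerate to
-- the constant 1 and it returns 1; B returns -1, the intended value since a calendar with
-- non-positive cycle lengths has no valid year.
def D_kaingCalendar (im : List Int) : Prop :=
  4 ≤ im.length ∧ im.getD 0 0 < 0 ∧ im.getD 1 0 < 0 ∧ im.getD 2 0 = 1 ∧ im.getD 3 0 = 1
instance (im : List Int) : Decidable (D_kaingCalendar im) := by
  unfold D_kaingCalendar; infer_instance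

def Spec_kaingCalendar (im : List Int) (out : Int) : Prop :=
  ¬ D_kaingCalendar im → out = kaingCalendar_alt im
instance (im : List Int) (out : Int) : Decidable (Spec_kaingCalendar im out) := by
  unfold Spec_kaingCalendar; infer_instance

def pvDiffWitness_kaingCalendar : List Int := [-1, -1, 1, 1]
def pvDiffWitnessOut_kaingCalendar : Int × Int := (1, -1)

-- ===== CLAIM (what is proved, stated in full; the proofs are below) =====
def Claim_unchanged_kaingCalendar : Prop := ∀ (im : List Int), Dom_kaingCalendar im → Pre_kaingCalendar im → Spec_kaingCalendar im (kaingCalendar im)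
def Claim_changed_kaingCalendar : Prop := Dom_kaingCalendar (pvDiffWitness_kaingCalendar) ∧ Pre_kaingCalendar (pvDiffWitness_kaingCalendar) ∧ D_kaingCalendar (pvDiffWitness_kaingCalendar) ∧ kaingCalendar (pvDiffWitness_kaingCalendar) = pvDiffWitnessOut_kaingCalendar.1 ∧ kaingCalendar_alt (pvDiffWitness_kaingCalendar) = pvDiffWitnessOut_kaingCalendar.2 ∧ pvDiffWitnessOut_kaingCalendar.1 ≠ pvDiffWitnessOut_kaingCalendar.2
def Claim_exact_kaingCalendar : Prop := ∀ (im : List Int), Dom_kaingCalendar im → Pre_kaingCalendar im → D_kaingCalendar im → kaingCalendar im ≠ kaingCalendar_alt im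

-- ===== LEMMAS AND PROOFS =====

-- Reference scan: checks candidates k, k+1, …, k+f-1 against the full modular condition.
def kaingScan (m n x y : Int) : Nat → Int → Int
  | 0, _ => -1
  | f + 1, k =>
    if (k - 1) % m + 1 = x ∧ (k - 1) % n + 1 = y then k else kaingScan m n x y f (k + 1)

theorem kaingScan_none (m n x y : Int) :
    ∀ (f : Nat) (k : Int),
      (∀ j : Int, k ≤ j → j < k + f → ¬ ((j - 1) % m + 1 = x ∧ (j - 1) % n + 1 = y)) →
      kaingScan m n x y f k = -1 := by
  intro f
  induction f with
  | zero => intro k _; rfl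
  | succ f ih =>
    intro k h
    have hk := h k (le_refl k) (by push_cast; omega)
    simp only [kaingScan, hk, if_false]
    exact ih (k + 1) (fun j h1 h2 => h j (by omega) (by push_cast at h2 ⊢; omega))

theorem kaingScan_skip (m n x y : Int) :
    ∀ (d : Nat) (f : Nat) (k : Int),
      (∀ j : Int, k ≤ j → j < k + d → ¬ ((j - 1) % m + 1 = x ∧ (j - 1) % n + 1 = y)) →
      kaingScan m n x y (d + f) k = kaingScan m n x y f (k + d) := by
  intro d
  induction d with
  | zero => intro f k _; simp
  | succ d ih =>
    intro f k h
    have hk := h k (le_refl k) (by push_cast; omega)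
    have : d + 1 + f = (d + f) + 1 := by omega
    rw [this]
    simp only [kaingScan, hk, if_false]
    rw [ih f (k + 1) (fun j h1 h2 => h j (by omega) (by push_cast at h2 ⊢; omega))]
    congr 1
    push_cast; ring

-- A's counters: at entry, count = c and cx/cy are the cycled values of c (0 at c = 0).
theorem kaingALoop_eq_scan (m n x y : Int) (hm : 1 ≤ m) (hn : 1 ≤ n) :
    ∀ (f : Nat) (c : Int), 0 ≤ c →
      kaingALoop m n x y f c (if c = 0 then 0 else (c - 1) % m + 1)
        (if c = 0 then 0 else (c - 1) % n + 1) =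
      kaingScan m n x y f (c + 1) := by
  intro f
  induction f with
  | zero => intro c _; rfl
  | succ f ih =>
    intro c hc
    have hcycle : ∀ (p : Int), 1 ≤ p →
        (if (if c = 0 then 0 else (c - 1) % p + 1) < p
         then (if c = 0 then 0 else (c - 1) % p + 1) + 1 else 1) = (c + 1 - 1) % p + 1 := by
      intro p hp
      by_cases h0 : c = 0
      · subst h0
        have e : (0 : Int) + 1 - 1 = 0 := by ring
        rw [e, Int.zero_emod]
        split_ifs <;> omega
      · simp only [if_neg h0]
        have hrn : 0 ≤ (c - 1) % p := Int.emod_nonneg _ (by omega)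
        have hrl : (c - 1) % p < p := Int.emod_lt_of_pos _ (by omega)
        have hstep : (c + 1 - 1) % p = ((c - 1) % p + 1) % p := by
          have e : c + 1 - 1 = (c - 1) + 1 := by ring
          rw [e, ← Int.emod_add_emod]
        by_cases hlt : (c - 1) % p + 1 < p
        · have e2 : ((c - 1) % p + 1) % p = (c - 1) % p + 1 :=
            Int.emod_eq_of_lt (by omega) hlt
          rw [if_pos hlt, hstep, e2]
        · have hpe : (c - 1) % p + 1 = p := by omega
          rw [if_neg hlt, hstep, hpe, Int.emod_self]
          norm_num
    simp only [kaingALoop]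
    rw [hcycle m hm, hcycle n hn]
    simp only [kaingScan]
    by_cases hmatch : (c + 1 - 1) % m + 1 = x ∧ (c + 1 - 1) % n + 1 = y
    · rw [if_pos hmatch, if_pos hmatch]
    · rw [if_neg hmatch, if_neg hmatch]
      have := ih (c + 1) (by omega)
      rw [if_neg (by omega), if_neg (by omega)] at this
      have e1 : c + 1 - 1 = c := by ring
      rw [e1] at this ⊢
      exact this

-- Candidates between two multiples of m never satisfy the first coordinate.
theorem kaing_between (m x : Int) (hm : 1 ≤ m) (hx1 : 1 ≤ x) (hx2 : x ≤ m)
    (k j : Int) (hk : (k - 1) % m + 1 = x) (h1 : k < j) (h2 : j < k + m) :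
    ¬ ((j - 1) % m + 1 = x) := by
  intro hj
  have hd : (j - 1) % m = (k - 1) % m := by omega
  have : (j - 1) % m = ((k - 1) + (j - k)) % m := by ring_nf
  rw [Int.add_emod] at this
  have hsmall : (j - k) % m = j - k :=
    Int.emod_eq_of_lt (by omega : (0:Int) ≤ j - k) (by omega : j - k < m)
  rw [hsmall] at this
  have hrn : 0 ≤ (k - 1) % m := Int.emod_nonneg _ (by omega)
  have hrl : (k - 1) % m < m := Int.emod_lt_of_pos _ (by omega)
  have hsum : ((k - 1) % m + (j - k)) % m = (k - 1) % m + (j - k) - (if (k-1) % m + (j-k) < m then 0 else m) := by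
    by_cases hc : (k - 1) % m + (j - k) < m
    · have e2 : ((k - 1) % m + (j - k)) % m = (k - 1) % m + (j - k) :=
        Int.emod_eq_of_lt (by omega) (by omega)
      rw [if_pos hc, e2]; ring
    · rw [if_neg hc]
      have : (k - 1) % m + (j - k) - m < m := by omega
      have e : (k - 1) % m + (j - k) = ((k - 1) % m + (j - k) - m) + 1 * m := by ring
      have e2 : ((k - 1) % m + (j - k) - m) % m = (k - 1) % m + (j - k) - m :=
        Int.emod_eq_of_lt (by omega) (by omega)
      rw [e, Int.add_mul_emod_self_right, e2]
      omega
  split_ifs at hsum with hc <;> omega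

theorem kaingScan_succ (m n x y : Int) (f : Nat) (k : Int) :
    kaingScan m n x y (f + 1) k =
      if (k - 1) % m + 1 = x ∧ (k - 1) % n + 1 = y then k
      else kaingScan m n x y f (k + 1) := rfl

theorem kaingBLoop_succ (m n y : Int) (f : Nat) (k : Int) :
    kaingBLoop m n y (f + 1) k =
      if k ≤ m * n then
        if PySem.Int.mod (k - 1) n + 1 = y then k else kaingBLoop m n y f (k + m)
      else -1 := rfl

-- B's stepped loop equals the reference scan from any aligned candidate.
theorem kaingBLoop_eq_scan (m n x y : Int) (hm : 1 ≤ m) (hn : 1 ≤ n)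
    (hx1 : 1 ≤ x) (hx2 : x ≤ m) :
    ∀ (g : Nat) (k : Int), 1 ≤ k → (k - 1) % m + 1 = x → m * n < k + m * g →
      kaingScan m n x y (m * n - k + 1).toNat k = kaingBLoop m n y (g + 1) k := by
  intro g
  induction g with
  | zero =>
    intro k hk1 hkx hfuel
    rw [kaingBLoop_succ, if_neg (by push_cast at hfuel; omega)]
    have : (m * n - k + 1).toNat = 0 := by push_cast at hfuel; omega
    rw [this]; rfl
  | succ g ih =>
    intro k hk1 hkx hfuel
    by_cases hbound : k ≤ m * n
    · have hfpos : (m * n - k + 1).toNat = ((m * n - k + 1).toNat - 1) + 1 := by omega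
      rw [hfpos, kaingScan_succ, kaingBLoop_succ, if_pos hbound]
      rw [PySem.Int.mod_eq_emod_of_pos (by omega)]
      by_cases hymatch : (k - 1) % n + 1 = y
      · rw [if_pos ⟨hkx, hymatch⟩, if_pos hymatch]
      · have hnomatch : ¬ ((k - 1) % m + 1 = x ∧ (k - 1) % n + 1 = y) := fun h => hymatch h.2
        rw [if_neg hnomatch, if_neg hymatch]
        by_cases hnext : k + m ≤ m * n + 1
        · -- skip the m-1 non-candidates between k and k+m
          have hdf : (m * n - k + 1).toNat - 1 = (m - 1).toNat + (m * n - (k + m) + 1).toNat := by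
            omega
          rw [hdf, kaingScan_skip m n x y (m - 1).toNat _ (k + 1)
            (fun j hj1 hj2 => by
              intro habs
              exact kaing_between m x hm hx1 hx2 k j hkx (by omega)
                (by push_cast at hj2 ⊢; omega) habs.1)]
          have e : k + 1 + ((m : Int) - 1).toNat = k + m := by push_cast; omega
          rw [e]
          exact ih (k + m) (by omega) (by
              have : k + m - 1 = (k - 1) + 1 * m := by ring
              rw [this, Int.add_mul_emod_self_right]; exact hkx)
            (by
              push_cast at hfuel ⊢
              have e3 : m * ((g : Int) + 1) = m * (g : Int) + m := by ring
              omega)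
        · -- no aligned candidate remains: both sides give -1
          rw [kaingScan_none m n x y _ (k + 1)
            (fun j hj1 hj2 => by
              intro habs
              exact kaing_between m x hm hx1 hx2 k j hkx (by omega)
                (by push_cast at hj2 ⊢; omega) habs.1)]
          rw [kaingBLoop_succ, if_neg (show ¬ (k + m ≤ m * n) by omega)]
    · rw [kaingBLoop_succ, if_neg hbound]
      have : (m * n - k + 1).toNat = 0 := by omega
      rw [this]; rfl

-- Degenerate case m ≤ 0 ∨ n ≤ 0 with m*n > 0 (both negative): A's counters stick at 1.
theorem kaingALoop_stuck (m n x y : Int) (hm : m ≤ 1) (hn : n ≤ 1)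
    (hxy : ¬ (1 = x ∧ 1 = y)) :
    ∀ (f : Nat) (c cx cy : Int), m ≤ cx → n ≤ cy →
      kaingALoop m n x y f c cx cy = -1 := by
  intro f
  induction f with
  | zero => intro c cx cy _ _; rfl
  | succ f ih =>
    intro c cx cy hcx hcy
    simp only [kaingALoop]
    rw [if_neg (show ¬ cx < m by omega), if_neg (show ¬ cy < n by omega), if_neg hxy]
    exact ih (c + 1) 1 1 hm hn

-- A's result for m, n ≥ 1 is the scan of all candidates 1..m*n.
theorem kaingA_eq_scan (m n x y : Int) (hm : 1 ≤ m) (hn : 1 ≤ n) :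
    kaingALoop m n x y (m * n).toNat 0 0 0 = kaingScan m n x y (m * n).toNat 1 := by
  have h := kaingALoop_eq_scan m n x y hm hn (m * n).toNat 0 (le_refl 0)
  rw [if_pos rfl, if_pos rfl] at h
  simpa using h

-- If x (resp. y) is out of range, the scan never matches.
theorem kaingScan_out (m n x y : Int) (hm : 1 ≤ m) (hn : 1 ≤ n)
    (h : ¬ (1 ≤ x ∧ x ≤ m ∧ 1 ≤ y ∧ y ≤ n)) (f : Nat) (k : Int) :
    kaingScan m n x y f k = -1 := by
  apply kaingScan_none
  intro j _ _ habs
  obtain ⟨h1, h2⟩ := habs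
  have hrm1 : 0 ≤ (j - 1) % m := Int.emod_nonneg _ (by omega)
  have hrm2 : (j - 1) % m < m := Int.emod_lt_of_pos _ (by omega)
  have hrn1 : 0 ≤ (j - 1) % n := Int.emod_nonneg _ (by omega)
  have hrn2 : (j - 1) % n < n := Int.emod_lt_of_pos _ (by omega)
  omega

-- ===== VERDICT (by name: the statement is the Claim_ definition above) =====
theorem kaingCalendar_spec : Claim_unchanged_kaingCalendar := by
  intro im _ hpre hnd
  obtain ⟨hlen, hlen4⟩ := hpre
  obtain ⟨a, b, rest, rfl⟩ : ∃ a b rest, im = a :: b :: rest := by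
    match im, hlen with
    | a :: b :: rest, _ => exact ⟨a, b, rest, rfl⟩
  simp only [Pre_kaingCalendar, List.getD, List.length_cons] at hlen4
  by_cases hmn : a * b ≤ 0
  · -- empty loop on both sides
    have hT : (a * b).toNat = 0 := by omega
    simp only [kaingCalendar, kaingCalendar_alt]
    simp only [PySem.List.pyGet?_zero_cons, Option.getD_some]
    have e1 : PySem.List.pyGet? (a :: b :: rest) 1 = some b := by
      rw [show (1:Int) = ((1:ℕ):Int) by norm_num, PySem.List.pyGet?_ofNat _ 1 (by simp)]
      simp
    rw [e1]
    simp only [Option.getD_some]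
    rw [if_pos hmn, hT]
    rfl
  · push_neg at hmn
    have h4 : 4 ≤ rest.length + 2 := by
      have := hlen4 (by simpa using hmn)
      simpa using this
    obtain ⟨x, y, rest', rfl⟩ : ∃ x y rest', rest = x :: y :: rest' := by
      match rest, h4 with
      | x :: y :: rest', _ => exact ⟨x, y, rest', rfl⟩
    have e0 : PySem.List.pyGet? (a :: b :: x :: y :: rest') 0 = some a := by
      rw [show (0:Int) = ((0:ℕ):Int) by norm_num, PySem.List.pyGet?_ofNat _ 0 (by simp)]
      simp
    have e1 : PySem.List.pyGet? (a :: b :: x :: y :: rest') 1 = some b := by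
      rw [show (1:Int) = ((1:ℕ):Int) by norm_num, PySem.List.pyGet?_ofNat _ 1 (by simp)]
      simp
    have e2 : PySem.List.pyGet? (a :: b :: x :: y :: rest') 2 = some x := by
      rw [show (2:Int) = ((2:ℕ):Int) by norm_num, PySem.List.pyGet?_ofNat _ 2 (by simp)]
      simp
    have e3 : PySem.List.pyGet? (a :: b :: x :: y :: rest') 3 = some y := by
      rw [show (3:Int) = ((3:ℕ):Int) by norm_num, PySem.List.pyGet?_ofNat _ 3 (by simp)]
      simp
    simp only [kaingCalendar, kaingCalendar_alt, e0, e1, e2, e3, Option.getD_some]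
    rw [if_neg (by omega)]
    by_cases hm1 : 1 ≤ a
    · have hn1 : 1 ≤ b := by
        by_cases h : b ≤ 0
        · nlinarith
        · omega
      by_cases hrange : 1 ≤ x ∧ x ≤ a ∧ 1 ≤ y ∧ y ≤ b
      · rw [if_pos hrange]
        obtain ⟨hx1, hx2, hy1, hy2⟩ := hrange
        rw [kaingA_eq_scan a b x y hm1 hn1]
        -- skip candidates 1..x-1, none of which has first coordinate x
        have hsplit : (a * b).toNat = (x - 1).toNat + (a * b - x + 1).toNat := by
          nlinarith [Int.toNat_of_nonneg (by omega : (0:Int) ≤ x - 1),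
            Int.toNat_of_nonneg (by nlinarith : (0:Int) ≤ a * b - x + 1),
            Int.toNat_of_nonneg (by omega : (0:Int) ≤ a * b)]
        rw [hsplit, kaingScan_skip a b x y (x - 1).toNat _ 1
          (fun j hj1 hj2 => by
            intro habs
            have hj : (j - 1) % a = j - 1 :=
              Int.emod_eq_of_lt (by omega : (0:Int) ≤ j - 1)
                (by push_cast at hj2; omega : j - 1 < a)
            rw [hj] at habs
            push_cast at hj2
            omega)]
        have e : (1 : Int) + ((x : Int) - 1).toNat = x := by push_cast; omega
        rw [e]
        rw [kaingBLoop_eq_scan a b x y hm1 hn1 hx1 hx2 b.toNat x hx1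
          (by
            have e2 : (x - 1) % a = x - 1 :=
              Int.emod_eq_of_lt (by omega) (by omega)
            rw [e2]; ring)
          (by push_cast; nlinarith [Int.toNat_of_nonneg (by omega : (0:Int) ≤ b)])]
      · rw [if_neg hrange]
        rw [kaingA_eq_scan a b x y hm1 hn1]
        exact kaingScan_out a b x y hm1 hn1 hrange _ _
    · -- a ≤ 0 and a*b > 0 forces a < 0, b < 0: counters stick at 1
      push_neg at hm1
      have hb : b < 0 := by nlinarith
      have ha : a < 0 := by nlinarith
      rw [if_neg (by omega)]
      simp only [D_kaingCalendar, List.getD, List.length_cons] at hnd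
      have hxy : ¬ ((1 : Int) = x ∧ (1 : Int) = y) := by
        intro ⟨h1, h2⟩
        exact hnd ⟨by omega, ha, hb, by simpa using h1.symm, by simpa using h2.symm⟩
      have hT : ∃ f, (a * b).toNat = f := ⟨_, rfl⟩
      obtain ⟨f, hf⟩ := hT
      rw [hf]
      cases f with
      | zero => rfl
      | succ f' =>
        simp only [kaingALoop]
        rw [if_neg (show ¬ (0:Int) < a by omega), if_neg (show ¬ (0:Int) < b by omega),
          if_neg hxy]
        exact kaingALoop_stuck a b x y (by omega) (by omega) hxy f' 1 1 1 (by omega) (by omega)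

theorem kaingCalendar_changed : Claim_changed_kaingCalendar := by
  unfold Claim_changed_kaingCalendar; decide

theorem kaingCalendar_tight : Claim_exact_kaingCalendar := by
  intro im _ hpre hd
  obtain ⟨h4, ha, hb, hx, hy⟩ := hd
  obtain ⟨a, b, x, y, rest, rfl⟩ : ∃ a b x y rest, im = a :: b :: x :: y :: rest := by
    match im, h4 with
    | a :: b :: x :: y :: rest, _ => exact ⟨a, b, x, y, rest, rfl⟩
  simp only [List.getD, List.getElem?_cons_zero, List.getElem?_cons_succ,
    Option.getD_some] at ha hb hx hy
  have e0 : PySem.List.pyGet? (a :: b :: x :: y :: rest) 0 = some a := by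
    rw [show (0:Int) = ((0:ℕ):Int) by norm_num, PySem.List.pyGet?_ofNat _ 0 (by simp)]
    simp
  have e1 : PySem.List.pyGet? (a :: b :: x :: y :: rest) 1 = some b := by
    rw [show (1:Int) = ((1:ℕ):Int) by norm_num, PySem.List.pyGet?_ofNat _ 1 (by simp)]
    simp
  have e2 : PySem.List.pyGet? (a :: b :: x :: y :: rest) 2 = some x := by
    rw [show (2:Int) = ((2:ℕ):Int) by norm_num, PySem.List.pyGet?_ofNat _ 2 (by simp)]
    simp
  have e3 : PySem.List.pyGet? (a :: b :: x :: y :: rest) 3 = some y := by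
    rw [show (3:Int) = ((3:ℕ):Int) by norm_num, PySem.List.pyGet?_ofNat _ 3 (by simp)]
    simp
  simp only [kaingCalendar, kaingCalendar_alt, e0, e1, e2, e3, Option.getD_some]
  have hmn : 0 < a * b := mul_pos_of_neg_of_neg ha hb
  rw [if_neg (show ¬ a * b ≤ 0 by omega),
    if_neg (show ¬ (1 ≤ x ∧ x ≤ a ∧ 1 ≤ y ∧ y ≤ b) by rintro ⟨_, h2, _, _⟩; omega)]
  have hT0 : 0 < (a * b).toNat := by omega
  have hT : ∃ f, (a * b).toNat = f + 1 := ⟨(a * b).toNat - 1, by omega⟩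
  obtain ⟨f, hf⟩ := hT
  rw [hf]
  simp only [kaingALoop]
  rw [if_neg (show ¬ (0:Int) < a by omega), if_neg (show ¬ (0:Int) < b by omega),
    if_pos ⟨hx.symm, hy.symm⟩]
  omega
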